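-- pv_equiv track=rewrite | github.com/kkrusere/NHANES-pyTOOL-API | NHANES_data_API.py | _check_in_between_cycle
-- ===== SOURCE A (Python) =====
-- def _check_in_between_cycle(start_year, end_year, cycle_list):
--     """
--     Check for valid cycles within a range.
--
--     Args:
--     start_year (str): The start year of the range.
--     end_year (str): The end year of the range.
--     cycle_list (list): List of available cycle years.
--
--     Returns:
--     list: List of valid cycle(s) within the range.
--     """
--     list_of_cycles_to_be_worked_on = []
--     flager = 0
--     for cycle in cycle_list:
--         if start_year in cycle:
--             flager = 1
--         if flager == 1:
--             list_of_cycles_to_be_worked_on.append(cycle)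
--         if end_year in cycle:
--             return list_of_cycles_to_be_worked_on
--     return list_of_cycles_to_be_worked_on
-- ===== SOURCE B (Python) =====
-- def _check_in_between_cycle(start_year, end_year, cycle_list):
--     start_idx = next((i for i, c in enumerate(cycle_list) if start_year in c), None)
--     if start_idx is None:
--         return []
--     end_idx = next((i for i, c in enumerate(cycle_list) if end_year in c), None)
--     if end_idx is None:
--         return cycle_list[start_idx:]
--     if start_idx > end_idx:
--         return []
--     return cycle_list[start_idx:end_idx + 1]
-- ===== Notes on version B (the rewrite author's own statement) =====
-- stated objective: simpler
-- what changed: Replaces the running-flag accumulation loop with two enumerate-based index searches (first cycle containing start_year / end_year) followed by list slicing.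
import Mathlib
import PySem

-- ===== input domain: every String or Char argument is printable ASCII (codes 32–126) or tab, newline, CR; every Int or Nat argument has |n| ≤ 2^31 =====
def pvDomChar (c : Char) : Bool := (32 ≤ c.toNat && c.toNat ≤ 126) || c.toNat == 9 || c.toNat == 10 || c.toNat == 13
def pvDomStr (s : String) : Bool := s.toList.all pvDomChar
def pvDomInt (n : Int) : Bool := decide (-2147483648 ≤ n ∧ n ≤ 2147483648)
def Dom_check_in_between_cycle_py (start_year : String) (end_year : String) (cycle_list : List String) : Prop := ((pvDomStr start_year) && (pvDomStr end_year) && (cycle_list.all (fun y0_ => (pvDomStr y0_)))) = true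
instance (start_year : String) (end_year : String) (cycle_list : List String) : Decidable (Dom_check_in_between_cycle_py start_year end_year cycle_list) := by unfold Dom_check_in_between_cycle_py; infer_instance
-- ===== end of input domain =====

-- B replaces A's running-flag accumulation loop with two index searches plus slicing (simpler decomposition; same cost).

-- ===== PORT A =====
-- the for-loop of A: state = (flager, accumulator); early return on an end_year match
def checkLoop (start_year : String) (end_year : String) : List String → Int → List String → List String
  | [], _, acc => acc
  | c :: rest, flager, acc =>
    let flager' := if PySem.Str.isIn start_year c then 1 else flager
    let acc' := if flager' == 1 then acc ++ [c] else acc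
    if PySem.Str.isIn end_year c then acc' else checkLoop start_year end_year rest flager' acc'

def check_in_between_cycle_py (start_year : String) (end_year : String) (cycle_list : List String) : List String :=
  checkLoop start_year end_year cycle_list 0 []

-- ===== PORT B =====
-- next((i for i,c in enumerate(...) if sub in c), None) is the first matching index: List.findIdx?;
-- cl[si:] is List.drop, cl[si:ei+1] with 0 ≤ si ≤ ei is (drop si).take (ei+1-si) (PySem.List.slice_of_nonneg)
def check_in_between_cycle_py_alt (start_year : String) (end_year : String) (cycle_list : List String) : List String :=
  match cycle_list.findIdx? (fun c => PySem.Str.isIn start_year c) with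
  | none => []
  | some si =>
    match cycle_list.findIdx? (fun c => PySem.Str.isIn end_year c) with
    | none => cycle_list.drop si
    | some ei => if si > ei then [] else (cycle_list.drop si).take (ei + 1 - si)

-- ===== PRECONDITION & SPEC =====
def Spec_check_in_between_cycle_py (start_year : String) (end_year : String) (cycle_list : List String) (out : List String) : Prop := out = check_in_between_cycle_py_alt start_year end_year cycle_list
instance (start_year : String) (end_year : String) (cycle_list : List String) (out : List String) : Decidable (Spec_check_in_between_cycle_py start_year end_year cycle_list out) := by unfold Spec_check_in_between_cycle_py; infer_instance

-- ===== CLAIM (what is proved, stated in full; the proofs are below) =====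
def Claim_equal_check_in_between_cycle_py : Prop := ∀ (start_year : String) (end_year : String) (cycle_list : List String), Dom_check_in_between_cycle_py start_year end_year cycle_list → Spec_check_in_between_cycle_py start_year end_year cycle_list (check_in_between_cycle_py start_year end_year cycle_list)

-- ===== LEMMAS AND PROOFS =====

-- prefix of cl up to and including the first cycle containing end_year (all of cl if none)
def upToEnd (end_year : String) : List String → List String
  | [] => []
  | c :: rest => if PySem.Str.isIn end_year c then [c] else c :: upToEnd end_year rest

theorem checkLoop_flag1 (s e : String) (cl : List String) : ∀ acc,
    checkLoop s e cl 1 acc = acc ++ upToEnd e cl := by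
  induction cl with
  | nil => intro acc; simp [checkLoop, upToEnd]
  | cons c rest ih =>
    intro acc
    simp [checkLoop, upToEnd, ih]
    split <;> simp

theorem upToEnd_of_none (e : String) (cl : List String)
    (h : cl.findIdx? (fun c => PySem.Chars.isIn e.toList c.toList) = none) : upToEnd e cl = cl := by
  induction cl with
  | nil => rfl
  | cons c rest ih =>
    by_cases hq : PySem.Chars.isIn e.toList c.toList = true
    · simp [List.findIdx?_cons, hq] at h
    · simp [List.findIdx?_cons, hq] at h
      simp [upToEnd, hq, ih (by simpa [List.findIdx?_eq_none_iff] using h)]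

theorem upToEnd_of_some (e : String) (cl : List String) : ∀ k,
    cl.findIdx? (fun c => PySem.Chars.isIn e.toList c.toList) = some k →
    upToEnd e cl = cl.take (k + 1) := by
  induction cl with
  | nil => intro k h; simp at h
  | cons c rest ih =>
    intro k h
    by_cases hq : PySem.Chars.isIn e.toList c.toList = true
    · simp [List.findIdx?_cons, hq] at h
      simp [upToEnd, hq, ← h]
    · simp [List.findIdx?_cons, hq, Option.map_eq_some_iff] at h
      obtain ⟨k', hk', rfl⟩ := h
      simp [upToEnd, hq, ih k' hk']

theorem checkLoop_main (s e : String) (cl : List String) :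
    checkLoop s e cl 0 [] = check_in_between_cycle_py_alt s e cl := by
  induction cl with
  | nil => simp [checkLoop, check_in_between_cycle_py_alt]
  | cons c rest ih =>
    by_cases hp : PySem.Chars.isIn s.toList c.toList = true
    · by_cases hq : PySem.Chars.isIn e.toList c.toList = true
      · -- start and end both match at c: A returns [c], B slices [0:1]
        simp [checkLoop, check_in_between_cycle_py_alt, List.findIdx?_cons, hp, hq]
      · -- start matches at index 0; A appends the rest up to the first end match
        simp [checkLoop, hp, hq, checkLoop_flag1, check_in_between_cycle_py_alt,
          List.findIdx?_cons]
        rcases h : rest.findIdx? (fun c => PySem.Chars.isIn e.toList c.toList) with _ | k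
        · simp [h, upToEnd_of_none e rest h]
        · simp [h, upToEnd_of_some e rest k h]
    · by_cases hq : PySem.Chars.isIn e.toList c.toList = true
      · -- end matches before any start match: A returns the empty accumulator
        simp [checkLoop, hp, hq, check_in_between_cycle_py_alt, List.findIdx?_cons]
        rcases h : rest.findIdx? (fun c => PySem.Chars.isIn s.toList c.toList) with _ | k <;>
          simp [h]
      · -- neither matches: both sides skip c (alt's indices shift by one)
        simp [checkLoop, hp, hq]
        rw [ih]
        simp [check_in_between_cycle_py_alt, List.findIdx?_cons, hp, hq]
        rcases hs : rest.findIdx? (fun c => PySem.Chars.isIn s.toList c.toList) with _ | si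
        · simp [hs]
        · simp only [hs, Option.map_some]
          rcases he : rest.findIdx? (fun c => PySem.Chars.isIn e.toList c.toList) with _ | ei
          · simp [he]
          · simp only [he, Option.map_some]
            by_cases hgt : ei < si
            · have h1 : ei + 1 < si + 1 := by omega
              simp [hgt, h1]
            · have h2 : ¬ (ei + 1 < si + 1) := by omega
              have h3 : ei + 1 + 1 - (si + 1) = ei + 1 - si := by omega
              simp [hgt, h2, h3]

-- ===== VERDICT (by name: the statement is the Claim_ definition above) =====
theorem check_in_between_cycle_py_spec : Claim_equal_check_in_between_cycle_py := by
  intro s e cl _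
  unfold Spec_check_in_between_cycle_py check_in_between_cycle_py
  exact checkLoop_main s e cl
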